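-- pv_equiv track=rewrite | github.com/LILTIMOTHY64/AI | CIA1/Hill_Climbing.py | best_neighbor
-- ===== SOURCE A (Python) =====
-- def path_cost(heuristic, solution):
--     return sum([heuristic[node] for node in solution])
--
-- def generate_neighbors(solution):
--     neighbors = []
--     for i in range(1, len(solution) - 1):  # Exclude the start and goal nodes from swapping
--         for j in range(i + 1, len(solution) - 1):
--             neighbor = solution.copy()
--             neighbor[i], neighbor[j] = neighbor[j], neighbor[i]  # Swap nodes
--             neighbors.append(neighbor)
--     return neighbors
--
-- def best_neighbor(graph, heuristic, current_solution):
--     neighbors = generate_neighbors(current_solution)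
--
--     best_neighbor = current_solution
--     best_cost = path_cost(heuristic, current_solution)
--
--     for neighbor in neighbors:
--         current_cost = path_cost(heuristic, neighbor)
--         if current_cost < best_cost:
--             best_cost = current_cost
--             best_neighbor = neighbor
--
--     return best_neighbor, best_cost
-- ===== SOURCE B (Python) =====
-- def best_neighbor(graph, heuristic, current_solution):
--     # Every neighbor is a transposition of current_solution, so every neighbor
--     # has the same path cost; the strict '<' in A never fires.  Return the
--     # current solution with its cost, summed left to right.
--     total = 0
--     for node in current_solution:
--         total += heuristic[node]
--     return current_solution, total
-- ===== Notes on version B (the rewrite author's own statement) =====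
-- stated objective: faster
-- what changed: B drops the neighbor generation and the scan entirely: every generated neighbor is a transposition of current_solution, so all costs are equal and A's strict '<' never fires; B returns (current_solution, sum of heuristics) in one pass.
import Mathlib
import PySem

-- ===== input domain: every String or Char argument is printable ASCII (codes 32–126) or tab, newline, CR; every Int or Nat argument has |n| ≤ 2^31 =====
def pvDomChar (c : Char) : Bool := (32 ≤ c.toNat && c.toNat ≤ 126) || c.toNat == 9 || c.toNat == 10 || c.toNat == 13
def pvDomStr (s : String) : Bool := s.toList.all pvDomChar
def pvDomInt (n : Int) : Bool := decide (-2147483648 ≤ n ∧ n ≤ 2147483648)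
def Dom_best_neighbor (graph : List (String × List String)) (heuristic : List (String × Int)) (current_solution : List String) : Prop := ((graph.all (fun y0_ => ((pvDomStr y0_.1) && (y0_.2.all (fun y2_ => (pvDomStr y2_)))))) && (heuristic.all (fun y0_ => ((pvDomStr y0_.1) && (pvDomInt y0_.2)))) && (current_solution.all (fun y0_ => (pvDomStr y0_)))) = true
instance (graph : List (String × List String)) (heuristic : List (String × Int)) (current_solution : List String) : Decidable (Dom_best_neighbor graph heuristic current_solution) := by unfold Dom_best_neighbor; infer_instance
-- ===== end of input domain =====

-- B replaces A's O(n^3) generate-and-scan with a single O(n) sum: every neighbor is a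
-- transposition of current_solution, so all neighbor costs equal the current cost and
-- A's strict '<' never fires; the return value is identical.

-- ===== PORT A =====
-- dict lookup heuristic[node]: first match in the association list; under Pre_ the key
-- is always present, so the 0 default is never used (outside Pre_ Python raises KeyError).
def pvPathCost (heuristic : List (String × Int)) (solution : List String) : Int :=
  (solution.map (fun node => (heuristic.lookup node).getD 0)).sum

-- one neighbor: copy of sol with positions i and j swapped (RHS tuple read first)
def pvSwap (sol : List String) (i j : Nat) : List String :=
  (sol.set i (sol.getD j "")).set j (sol.getD i "")

def pvGenNeighbors (sol : List String) : List (List String) :=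
  (PySem.List.pyRange 1 ((sol.length : Int) - 1) 1).foldl (fun acc i =>
    (PySem.List.pyRange (i + 1) ((sol.length : Int) - 1) 1).foldl (fun acc2 j =>
      acc2 ++ [pvSwap sol i.toNat j.toNat]) acc) []

def best_neighbor (graph : List (String × List String)) (heuristic : List (String × Int)) (current_solution : List String) : List String × Int :=
  let neighbors := pvGenNeighbors current_solution
  let init : List String × Int := (current_solution, pvPathCost heuristic current_solution)
  neighbors.foldl (fun best nb =>
    let current_cost := pvPathCost heuristic nb
    if current_cost < best.2 then (nb, current_cost) else best) init

-- ===== PORT B =====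
def best_neighbor_alt (graph : List (String × List String)) (heuristic : List (String × Int)) (current_solution : List String) : List String × Int :=
  (current_solution,
   current_solution.foldl (fun total node => total + (heuristic.lookup node).getD 0) 0)

-- ===== PRECONDITION & SPEC =====
-- Pre_ excludes exactly the inputs on which Python A raises KeyError: a node of
-- current_solution missing from the heuristic dict (B raises there too).
def Pre_best_neighbor (graph : List (String × List String)) (heuristic : List (String × Int)) (current_solution : List String) : Prop :=
  ∀ node ∈ current_solution, (heuristic.lookup node).isSome
instance (graph : List (String × List String)) (heuristic : List (String × Int)) (current_solution : List String) : Decidable (Pre_best_neighbor graph heuristic current_solution) := by unfold Pre_best_neighbor; infer_instance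
def pvWitness_best_neighbor : (List (String × List String)) × (List (String × Int)) × List String :=
  ([("A", ["B", "C"])], [("A", 3), ("B", 1), ("C", 2)], ["A", "B", "C"])

def Spec_best_neighbor (graph : List (String × List String)) (heuristic : List (String × Int)) (current_solution : List String) (out : List String × Int) : Prop := out = best_neighbor_alt graph heuristic current_solution
instance (graph : List (String × List String)) (heuristic : List (String × Int)) (current_solution : List String) (out : List String × Int) : Decidable (Spec_best_neighbor graph heuristic current_solution out) := by unfold Spec_best_neighbor; infer_instance

-- ===== CLAIM (what is proved, stated in full; the proofs are below) =====
def Claim_equal_best_neighbor : Prop := ∀ (graph : List (String × List String)) (heuristic : List (String × Int)) (current_solution : List String), Dom_best_neighbor graph heuristic current_solution → Pre_best_neighbor graph heuristic current_solution → Spec_best_neighbor graph heuristic current_solution (best_neighbor graph heuristic current_solution)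

-- ===== LEMMAS AND PROOFS =====

-- sum of an Int list after a single in-range update
theorem pv_sum_set (xs : List Int) (n : Nat) (a : Int) (h : n < xs.length) :
    (xs.set n a).sum = xs.sum - xs[n] + a := by
  induction xs generalizing n with
  | nil => simp at h
  | cons x xs ih =>
    cases n with
    | zero => simp [List.set]; ring
    | succ m =>
      simp only [List.set, List.sum_cons, List.getElem_cons_succ]
      rw [ih m (by simpa using h)]
      ring

-- swapping two in-range positions preserves the path cost
theorem pv_cost_swap (heuristic : List (String × Int)) (sol : List String)
    (i j : Nat) (hi : i < sol.length) (hj : j < sol.length) (hij : i ≠ j) :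
    pvPathCost heuristic (pvSwap sol i j) = pvPathCost heuristic sol := by
  unfold pvPathCost pvSwap
  set f : String → Int := fun node => (heuristic.lookup node).getD 0 with hf
  rw [List.getD_eq_getElem sol "" hj, List.getD_eq_getElem sol "" hi]
  rw [List.map_set, List.map_set]
  have h1 : i < (sol.map f).length := by simpa using hi
  have h2 : j < ((sol.map f).set i (f sol[j])).length := by simpa using hj
  rw [pv_sum_set _ j _ h2, pv_sum_set _ i _ h1]
  have h3 : ((List.map f sol).set i (f sol[j]))[j]'h2 = (List.map f sol)[j]'(by simpa using hj) :=
    List.getElem_set_ne (by omega) h2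
  rw [h3]
  simp only [List.getElem_map]
  ring

-- every generated neighbor has the same cost as the current solution
theorem pv_cost_mem_gen (heuristic : List (String × Int)) (sol : List String)
    (nb : List String) (hnb : nb ∈ pvGenNeighbors sol) :
    pvPathCost heuristic nb = pvPathCost heuristic sol := by
  unfold pvGenNeighbors at hnb
  rw [show (fun (acc : List (List String)) (i : Int) =>
        (PySem.List.pyRange (i + 1) ((sol.length : Int) - 1) 1).foldl (fun acc2 j =>
          acc2 ++ [pvSwap sol i.toNat j.toNat]) acc)
      = (fun acc i => acc ++ (PySem.List.pyRange (i + 1) ((sol.length : Int) - 1) 1).map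
          (fun j => pvSwap sol i.toNat j.toNat)) from
    funext fun acc => funext fun i => PySem.List.foldl_append_singleton_eq_map _ _ _] at hnb
  rw [PySem.List.foldl_append_eq_flatMap] at hnb
  simp only [List.nil_append, List.mem_flatMap, List.mem_map] at hnb
  obtain ⟨i, hi, j, hj, rfl⟩ := hnb
  rw [PySem.List.mem_pyRange_one] at hi hj
  apply pv_cost_swap
  · omega
  · omega
  · omega

-- a fold over neighbors of equal cost never updates the accumulator
theorem pv_fold_const (heuristic : List (String × Int)) (c : Int)
    (l : List (List String)) (hl : ∀ nb ∈ l, pvPathCost heuristic nb = c)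
    (s : List String) :
    l.foldl (fun best nb =>
      let current_cost := pvPathCost heuristic nb
      if current_cost < best.2 then (nb, current_cost) else best) (s, c) = (s, c) := by
  induction l with
  | nil => rfl
  | cons x xs ih =>
    have hx := hl x (List.mem_cons_self)
    simp only [List.foldl_cons]
    rw [show (let current_cost := pvPathCost heuristic x;
          if current_cost < (s, c).2 then (x, current_cost) else (s, c)) = (s, c) by
      simp [hx]]
    exact ih (fun nb hnb => hl nb (List.mem_cons_of_mem _ hnb))

-- B's running total equals A's map-then-sum
theorem pv_alt_cost (heuristic : List (String × Int)) (sol : List String) :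
    sol.foldl (fun total node => total + (heuristic.lookup node).getD 0) 0
      = pvPathCost heuristic sol := by
  unfold pvPathCost
  rw [PySem.List.foldl_add]
  simp

-- ===== VERDICT (by name: the statement is the Claim_ definition above) =====
theorem best_neighbor_spec : Claim_equal_best_neighbor := by
  intro graph heuristic current_solution _ _
  unfold Spec_best_neighbor best_neighbor best_neighbor_alt
  rw [pv_alt_cost]
  exact pv_fold_const heuristic _ _
    (fun nb hnb => pv_cost_mem_gen heuristic current_solution nb hnb) current_solution
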